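-- pv_equiv track=rewrite | github.com/cometadata/funding-metadata-enrichment | extract-funding-from-full-text/markdown_healer.py | _trim_blank_runs
-- ===== SOURCE A (Python) =====
-- from typing import List, Optional, Tuple
--
-- def _trim_blank_runs(lines: List[str]) -> List[str]:
--     trimmed: List[str] = []
--     blank_run = 0
--
--     for line in lines:
--         stripped = line.strip()
--         if stripped:
--             blank_run = 0
--             trimmed.append(line)
--         else:
--             blank_run += 1
--             if blank_run <= 2:
--                 trimmed.append('')
--
--     while trimmed and not trimmed[0]:
--         trimmed.pop(0)
--     while trimmed and not trimmed[-1]: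
--         trimmed.pop()
--
--     return trimmed
-- ===== SOURCE B (Python) =====
-- from itertools import dropwhile
-- from typing import List
--
-- def _trim_blank_runs(lines: List[str]) -> List[str]:
--     # Stateless stencil: normalize blanks to '', then keep each line based only on
--     # itself and the two shifted copies of the normalized list (a line is dropped
--     # exactly when it and its two predecessors are all blank), then trim both ends.
--     norm = ['' if not line.strip() else line for line in lines]
--     kept = [cur for cur, prev1, prev2 in zip(norm, ['x'] + norm, ['x', 'x'] + norm)
--             if cur or prev1 or prev2]
--     kept = list(dropwhile(lambda s: not s, kept))
--     kept.reverse()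
--     kept = list(dropwhile(lambda s: not s, kept))
--     kept.reverse()
--     return kept
-- ===== Notes on version B (the rewrite author's own statement) =====
-- stated objective: alternative
-- what changed: Replaces A's stateful single pass (running blank_run counter plus edge pop-loops) with a stateless stencil: normalize blanks to '', zip the list with its two shifted copies and keep a line iff it or one of its two predecessors is non-blank, then dropwhile blanks from both ends.
import Mathlib
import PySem

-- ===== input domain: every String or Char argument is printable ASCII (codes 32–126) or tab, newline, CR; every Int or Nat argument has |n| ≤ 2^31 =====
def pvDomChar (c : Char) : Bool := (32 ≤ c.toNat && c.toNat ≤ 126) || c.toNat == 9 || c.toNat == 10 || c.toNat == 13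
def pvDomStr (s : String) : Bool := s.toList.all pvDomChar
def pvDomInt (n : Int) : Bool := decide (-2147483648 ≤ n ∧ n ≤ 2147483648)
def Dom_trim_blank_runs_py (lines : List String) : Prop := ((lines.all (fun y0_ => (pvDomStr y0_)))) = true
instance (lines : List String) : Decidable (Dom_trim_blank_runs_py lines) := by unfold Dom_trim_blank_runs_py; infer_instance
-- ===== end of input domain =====

-- B replaces A's stateful counter scan and edge while/pop loops by a stateless
-- stencil filter over the normalized list zipped with its two shifted copies,
-- plus dropwhile from both ends: alternative decomposition, same cost.

-- ===== PORT A =====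
-- A's for-loop over the state (trimmed, blank_run)
def trimStepA (st : List String × Int) (line : String) : List String × Int :=
  let stripped := PySem.Str.strip line
  if stripped ≠ "" then (st.1 ++ [line], 0)
  else
    let br := st.2 + 1
    (if br ≤ 2 then st.1 ++ [""] else st.1, br)

-- A's `while trimmed and not trimmed[0]: trimmed.pop(0)`
def pyPopFrontBlanks : List String → List String
  | [] => []
  | x :: xs => if x == "" then pyPopFrontBlanks xs else x :: xs

-- A's `while trimmed and not trimmed[-1]: trimmed.pop()`
def pyPopBackBlanks : List String → List String
  | [] => []
  | x :: xs =>
    match pyPopBackBlanks xs with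
    | [] => if x == "" then [] else [x]
    | ys => x :: ys

def trim_blank_runs_py (lines : List String) : List String :=
  let trimmed := (lines.foldl trimStepA ([], 0)).1
  let trimmed := pyPopFrontBlanks trimmed
  pyPopBackBlanks trimmed

-- ===== PORT B =====
-- `'' if not line.strip() else line`
def normLine (line : String) : String :=
  if PySem.Str.strip line == "" then "" else line

def trim_blank_runs_py_alt (lines : List String) : List String :=
  let norm := lines.map normLine
  -- zip(norm, ['x'] + norm, ['x','x'] + norm), keep cur when any of the three is truthy
  let kept := ((norm.zip (("x" :: norm).zip ("x" :: "x" :: norm))).filter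
      (fun t => (t.1 != "") || (t.2.1 != "") || (t.2.2 != ""))).map (·.1)
  let kept := kept.dropWhile (· == "")
  let kept := (kept.reverse.dropWhile (· == "")).reverse
  kept

-- ===== PRECONDITION & SPEC =====
def Spec_trim_blank_runs_py (lines : List String) (out : List String) : Prop := out = trim_blank_runs_py_alt lines
instance (lines : List String) (out : List String) : Decidable (Spec_trim_blank_runs_py lines out) := by unfold Spec_trim_blank_runs_py; infer_instance

-- ===== CLAIM (what is proved, stated in full; the proofs are below) =====
def Claim_equal_trim_blank_runs_py : Prop := ∀ (lines : List String), Dom_trim_blank_runs_py lines → Spec_trim_blank_runs_py lines (trim_blank_runs_py lines)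

-- ===== LEMMAS AND PROOFS =====

-- A's loop, rephrased as tail recursion on the remaining lines
def tailA : List String → Int → List String
  | [], _ => []
  | l :: ls, br =>
    if PySem.Str.strip l ≠ "" then l :: tailA ls 0
    else (if br + 1 ≤ 2 then [""] else []) ++ tailA ls (br + 1)

theorem foldl_trimStepA (xs : List String) : ∀ (acc : List String) (br : Int),
    (xs.foldl trimStepA (acc, br)).1 = acc ++ tailA xs br := by
  induction xs with
  | nil => intro acc br; simp [tailA]
  | cons l ls ih =>
    intro acc br
    simp only [List.foldl_cons, trimStepA, tailA]
    by_cases h : PySem.Str.strip l = ""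
    · simp only [h, ite_not, reduceIte]
      by_cases h2 : br + 1 ≤ 2 <;> simp [h2, ih]
    · simp [h, ih]

-- B's stencil filter, rephrased as recursion carrying the two previous normalized lines
def cappedAux : String → String → List String → List String
  | _, _, [] => []
  | p2, p1, x :: xs =>
    (if x ≠ "" ∨ p1 ≠ "" ∨ p2 ≠ "" then [x] else []) ++ cappedAux p1 x xs

theorem zip_filter_eq_cappedAux (ns : List String) : ∀ (p1 p2 : String),
    ((ns.zip ((p1 :: ns).zip (p2 :: p1 :: ns))).filter
      (fun t => (t.1 != "") || (t.2.1 != "") || (t.2.2 != ""))).map (·.1)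
      = cappedAux p2 p1 ns := by
  induction ns with
  | nil => intro p1 p2; rfl
  | cons x xs ih =>
    intro p1 p2
    simp only [List.zip_cons_cons, List.filter_cons, cappedAux]
    by_cases h : x ≠ "" ∨ p1 ≠ "" ∨ p2 ≠ ""
    · have hb : ((x != "") || (p1 != "") || (p2 != "")) = true := by
        rcases h with h | h | h <;> simp [h]
      have ih' := ih x p1
      simp only [List.zip_cons_cons] at ih'
      simp [hb, h, ih']
    · have h' : x = "" ∧ p1 = "" ∧ p2 = "" := by
        by_contra hc
        apply h
        by_cases h1 : x = "" <;> by_cases h2 : p1 = "" <;> by_cases h3 : p2 = "" <;>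
          simp_all
      have hb : ((x != "") || (p1 != "") || (p2 != "")) = false := by
        simp [h'.1, h'.2.1, h'.2.2]
      have ih' := ih x p1
      simp only [List.zip_cons_cons] at ih'
      simp [hb, h, ih']

-- the counter/stencil correspondence: br = 0 ↔ p1 nonblank, br ≤ 1 ↔ p1 or p2 nonblank
theorem tailA_eq_cappedAux (xs : List String) : ∀ (br : Int) (p1 p2 : String),
    0 ≤ br → (br ≤ 0 ↔ p1 ≠ "") → (br ≤ 1 ↔ (p1 ≠ "" ∨ p2 ≠ "")) →
    tailA xs br = cappedAux p2 p1 (xs.map normLine) := by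
  induction xs with
  | nil => intro br p1 p2 _ _ _; rfl
  | cons l ls ih =>
    intro br p1 p2 hbr h0 h1
    simp only [List.map_cons, tailA, cappedAux]
    by_cases hl : PySem.Str.strip l = ""
    · have hn : normLine l = "" := by simp [normLine, hl]
      rw [if_neg (by simpa using hl), hn]
      by_cases h2 : br + 1 ≤ 2
      · rw [if_pos h2]
        have hkeep : ("" : String) ≠ "" ∨ p1 ≠ "" ∨ p2 ≠ "" := by
          rcases (h1.1 (by omega)) with h | h
          · exact Or.inr (Or.inl h)
          · exact Or.inr (Or.inr h)
        rw [if_pos hkeep]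
        have := ih (br + 1) "" p1 (by omega)
          (by constructor <;> intro h <;> [omega; exact absurd rfl h])
          (by constructor
              · intro h; exact Or.inr (h0.1 (by omega))
              · rintro (h | h); · exact absurd rfl h
                · have := h0.2 h; omega)
        simpa using this
      · rw [if_neg h2]
        have hp1 : p1 = "" := by
          by_contra hc; have := h0.2 hc; omega
        have hp2 : p2 = "" := by
          by_contra hc
          have := h1.2 (Or.inr hc); omega
        rw [if_neg (by push Not; exact ⟨rfl, hp1, hp2⟩)]
        have := ih (br + 1) "" p1 (by omega)
          (by constructor <;> intro h <;> [omega; exact absurd rfl h])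
          (by constructor
              · intro h; omega
              · rintro (h | h); · exact absurd rfl h
                · exact absurd hp1 h)
        simpa using this
    · have hn : normLine l = l := by simp [normLine, hl]
      have hlne : l ≠ "" := by
        intro h; subst h; exact hl (by decide)
      rw [if_pos (by simpa using hl), hn, if_pos (Or.inl hlne)]
      have := ih 0 l p1 le_rfl
        (by simp [hlne]) (by simp [hlne])
      simpa using this

-- front trimming: A's pop(0) loop is dropWhile
theorem pyPopFrontBlanks_eq_dropWhile (xs : List String) :
    pyPopFrontBlanks xs = xs.dropWhile (· == "") := by
  induction xs with
  | nil => rfl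
  | cons x xs ih =>
    simp only [pyPopFrontBlanks, List.dropWhile_cons]
    by_cases h : x = "" <;> simp [h, ih]

-- back trimming: A's pop() loop is reverse ∘ dropWhile ∘ reverse
theorem pyPopBackBlanks_eq (xs : List String) :
    pyPopBackBlanks xs = (xs.reverse.dropWhile (· == "")).reverse := by
  induction xs with
  | nil => rfl
  | cons x xs ih =>
    simp only [pyPopBackBlanks, ih, List.reverse_cons, List.dropWhile_append]
    by_cases he : (List.dropWhile (· == "") xs.reverse).isEmpty
    · have hnil : List.dropWhile (fun x => x == "") xs.reverse = [] := by
        simpa [List.isEmpty_iff] using he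
      rw [hnil]
      by_cases hx : x = ""
      · simp [hx, List.dropWhile]
      · have hxb : (x == "") = false := by simpa using hx
        simp [hxb, List.dropWhile]
    · have hne : List.dropWhile (fun x => x == "") xs.reverse ≠ [] := by
        simpa [List.isEmpty_iff] using he
      simp only [he, Bool.false_eq_true, if_false]
      cases hl : (List.dropWhile (fun x => x == "") xs.reverse).reverse with
      | nil => exact absurd (by simpa using hl) hne
      | cons y ys => simp [← hl]

-- ===== VERDICT (by name: the statement is the Claim_ definition above) =====
theorem trim_blank_runs_py_spec : Claim_equal_trim_blank_runs_py := by
  intro lines _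
  unfold Spec_trim_blank_runs_py trim_blank_runs_py trim_blank_runs_py_alt
  dsimp only
  rw [foldl_trimStepA, List.nil_append,
    tailA_eq_cappedAux lines 0 "x" "x" le_rfl (by simp) (by simp),
    ← zip_filter_eq_cappedAux, pyPopFrontBlanks_eq_dropWhile, pyPopBackBlanks_eq]
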